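-- pv_equiv track=rewrite | github.com/H0r4c3/Challenges | py.checkio.org/nearest_value.py | nearest_value
-- ===== SOURCE A (Python) =====
-- def nearest_value(values: set, one: int) -> int:
--     if one in values:
--         return one
--
--     values_list = sorted(list(values))
--
--     index_list = [(values_list.index(item), abs(item - one)) for item in values_list]
--     index_list.sort(key=lambda x: x[1])
--     index_ok = index_list[0][0]
--
--     return values_list[index_ok]
-- ===== SOURCE B (Python) =====
-- def nearest_value(values: set, one: int) -> int:
--     return min(values, key=lambda v: (abs(v - one), v))
-- ===== Notes on version B (the rewrite author's own statement) =====
-- stated objective: alternative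
-- what changed: Replaced membership check + sort + list.index pair-building + a second sort by a single pass: min(values, key=lambda v: (abs(v - one), v)).
import Mathlib
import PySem

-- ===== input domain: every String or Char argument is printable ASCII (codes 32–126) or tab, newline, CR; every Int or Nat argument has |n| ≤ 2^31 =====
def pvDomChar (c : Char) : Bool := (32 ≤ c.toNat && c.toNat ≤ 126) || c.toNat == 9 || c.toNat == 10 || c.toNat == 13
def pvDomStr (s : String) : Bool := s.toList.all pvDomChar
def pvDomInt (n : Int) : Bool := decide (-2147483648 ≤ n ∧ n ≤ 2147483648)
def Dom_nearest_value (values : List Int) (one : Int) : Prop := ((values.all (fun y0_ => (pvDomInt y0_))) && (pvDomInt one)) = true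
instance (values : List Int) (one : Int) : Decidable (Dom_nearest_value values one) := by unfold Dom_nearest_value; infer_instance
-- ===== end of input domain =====

-- B replaces A's membership check + sort + index-pair building + second sort by a single
-- pass taking min(values, key=lambda v: (abs(v - one), v)); objective: alternative algorithm.


-- ===== PORT A =====
def nearest_value (values : List Int) (one : Int) : Int :=
  if values.contains one then one
  else
    let values_list := PySem.List.sorted values (fun x => x) false
    let index_list := values_list.map
      (fun item => ((((PySem.List.index? values_list item).getD 0 : Nat) : Int), |item - one|))
    let index_sorted := PySem.List.sorted index_list (fun x => x.2) false
    let index_ok := (index_sorted.headD (0, 0)).1   -- index_list[0]: IndexError on empty, excluded by Pre_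
    PySem.List.pyGetD values_list index_ok 0

-- ===== PORT B =====
def nearest_value_alt (values : List Int) (one : Int) : Int :=
  -- min(values, key=lambda v: (abs(v - one), v)); ValueError on empty, excluded by Pre_
  (PySem.List.min2? values (fun v => |v - one|) (fun v => v)).getD 0

-- ===== PRECONDITION & SPEC =====
-- Both A (index_list[0]) and B (min of an empty set) raise on values = []; nothing else raises.
def Pre_nearest_value (values : List Int) (one : Int) : Prop := values ≠ []
instance (values : List Int) (one : Int) : Decidable (Pre_nearest_value values one) := by unfold Pre_nearest_value; infer_instance
def pvWitness_nearest_value : List Int × Int := ([4, 7, 10, 11], 9)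

def Spec_nearest_value (values : List Int) (one : Int) (out : Int) : Prop := out = nearest_value_alt values one
instance (values : List Int) (one : Int) (out : Int) : Decidable (Spec_nearest_value values one out) := by unfold Spec_nearest_value; infer_instance

-- ===== CLAIM (what is proved, stated in full; the proofs are below) =====
def Claim_equal_nearest_value : Prop := ∀ (values : List Int) (one : Int), Dom_nearest_value values one → Pre_nearest_value values one → Spec_nearest_value values one (nearest_value values one)

-- ===== LEMMAS AND PROOFS =====

/-- `m` is the lexicographically-(|·-one|, id)-least element of `xs`. -/
def IsLexMin (one m : Int) (xs : List Int) : Prop :=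
  m ∈ xs ∧ ∀ y ∈ xs, |m - one| < |y - one| ∨ (|m - one| = |y - one| ∧ m ≤ y)

theorem isLexMin_unique {one m m' : Int} {xs : List Int}
    (h : IsLexMin one m xs) (h' : IsLexMin one m' xs) : m = m' := by
  obtain ⟨hm, hall⟩ := h
  obtain ⟨hm', hall'⟩ := h'
  have h1 := hall m' hm'
  have h2 := hall' m hm
  omega

theorem isLexMin_of_perm {one m : Int} {xs ys : List Int} (hp : ∀ z, z ∈ xs ↔ z ∈ ys)
    (h : IsLexMin one m xs) : IsLexMin one m ys := by
  obtain ⟨hm, hall⟩ := h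
  exact ⟨(hp m).1 hm, fun y hy => hall y ((hp y).2 hy)⟩

-- ---- B side: the min2? fold computes the lex-min ----

/-- The fold step of `min2?` with keys `(|· - one|, id)`. -/
def bstep (one : Int) (acc : Option Int) (x : Int) : Option Int :=
  match acc with
  | none => some x
  | some mm =>
    if (decide (|x - one| < |mm - one|) || !decide (|mm - one| < |x - one|) && decide (x < mm)) = true
    then some x else some mm

theorem min2?_eq_foldl_bstep (values : List Int) (one : Int) :
    PySem.List.min2? values (fun v => |v - one|) (fun v => v) = values.foldl (bstep one) none := by
  unfold PySem.List.min2?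
  congr 1
  funext acc x
  cases acc <;> rfl

theorem min2?_foldl_lexmin (one : Int) :
    ∀ (xs : List Int) (a m : Int),
      xs.foldl (bstep one) (some a) = some m →
      (m = a ∨ m ∈ xs) ∧ (|m - one| < |a - one| ∨ (|m - one| = |a - one| ∧ m ≤ a)) ∧
        ∀ y ∈ xs, |m - one| < |y - one| ∨ (|m - one| = |y - one| ∧ m ≤ y) := by
  intro xs
  induction xs with
  | nil =>
    intro a m h
    simp only [List.foldl_nil, Option.some.injEq] at h
    subst h
    exact ⟨Or.inl rfl, by omega, by simp⟩
  | cons x t ih =>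
    intro a m h
    simp only [List.foldl_cons, bstep] at h
    by_cases hc : (decide (|x - one| < |a - one|) || !decide (|a - one| < |x - one|) && decide (x < a)) = true
    · rw [if_pos hc] at h
      obtain ⟨hmem, hrel, hall⟩ := ih x m h
      simp only [Bool.or_eq_true, Bool.and_eq_true, decide_eq_true_eq, Bool.not_eq_true',
        decide_eq_false_iff_not] at hc
      refine ⟨?_, by omega, ?_⟩
      · rcases hmem with h1 | h1 <;> simp [h1]
      · intro y hy
        rcases List.mem_cons.mp hy with h1 | h1
        · subst h1; omega
        · exact hall y h1
    · rw [if_neg hc] at h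
      obtain ⟨hmem, hrel, hall⟩ := ih a m h
      simp only [Bool.or_eq_true, Bool.and_eq_true, decide_eq_true_eq, Bool.not_eq_true',
        decide_eq_false_iff_not, not_or, not_and, not_lt] at hc
      refine ⟨?_, hrel, ?_⟩
      · rcases hmem with h1 | h1 <;> simp [h1]
      · intro y hy
        rcases List.mem_cons.mp hy with h1 | h1
        · subst h1; omega
        · exact hall y h1

theorem min2?_foldl_isSome (one : Int) :
    ∀ (xs : List Int) (a : Int),
      (xs.foldl (bstep one) (some a)).isSome := by
  intro xs
  induction xs with
  | nil => intro a; rfl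
  | cons x t ih =>
    intro a
    simp only [List.foldl_cons, bstep] at *
    by_cases hc : (decide (|x - one| < |a - one|) || !decide (|a - one| < |x - one|) && decide (x < a)) = true
    · rw [if_pos hc]; exact ih x
    · rw [if_neg hc]; exact ih a

theorem alt_isLexMin (values : List Int) (one : Int) (h : values ≠ []) :
    IsLexMin one (nearest_value_alt values one) values := by
  unfold nearest_value_alt
  rw [min2?_eq_foldl_bstep]
  cases values with
  | nil => exact absurd rfl h
  | cons v t =>
    simp only [List.foldl_cons, bstep]
    obtain ⟨m, hm⟩ := Option.isSome_iff_exists.mp (min2?_foldl_isSome one t v)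
    rw [hm, Option.getD_some]
    obtain ⟨hmem, hrel, hall⟩ := min2?_foldl_lexmin one t v m hm
    constructor
    · rcases hmem with h1 | h1 <;> simp [h1]
    · intro y hy
      rcases List.mem_cons.mp hy with h1 | h1
      · subst h1; omega
      · exact hall y h1

-- ---- A side ----

/-- head? of insertBy. -/
theorem headOpt_insertBy {α : Type} (bef : α → α → Bool) (x : α) (ys : List α) :
    (PySem.List.insertBy bef x ys).head? =
      some (match ys with | [] => x | y :: _ => if bef x y then x else y) := by
  cases ys with
  | nil => rfl
  | cons y t =>
    simp only [PySem.List.insertBy]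
    by_cases h : bef x y <;> simp [h]

/-- The fold step of `min?`. -/
def mstep {α κ : Type} [LT κ] [DecidableLT κ] (key : α → κ) (m : Option α) (x : α) : Option α :=
  match m with
  | none => some x
  | some mm => if key x < key mm then some x else some mm

theorem min?_eq_foldl_mstep {α κ : Type} [LT κ] [DecidableLT κ] (xs : List α) (key : α → κ) :
    PySem.List.min? xs key = xs.foldl (mstep key) none := by
  unfold PySem.List.min?
  congr 1

theorem headOpt_foldl_insertBy {α κ : Type} [LT κ] [DecidableLT κ] (key : α → κ) :
    ∀ (xs acc : List α),
      (xs.foldl (fun acc x => PySem.List.insertBy (fun a b => decide (key a < key b)) x acc) acc).head? =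
        xs.foldl (mstep key) acc.head? := by
  intro xs
  induction xs with
  | nil => intro acc; rfl
  | cons x t ih =>
    intro acc
    simp only [List.foldl_cons]
    rw [ih]
    congr 1
    cases acc with
    | nil => rfl
    | cons y ys =>
      rw [headOpt_insertBy]
      by_cases h : key x < key y <;> simp [mstep, h]

/-- head? of the stable insertion sort is min? (the first key-minimal element). -/
theorem headOpt_sorted_eq_min? {α κ : Type} [LT κ] [DecidableLT κ] (xs : List α) (key : α → κ) :
    (PySem.List.sorted xs key false).head? = PySem.List.min? xs key := by
  rw [PySem.List.sorted_eq_foldl_insertBy, min?_eq_foldl_mstep]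
  exact headOpt_foldl_insertBy key xs []

theorem foldl_mstep_map {α β κ : Type} [LT κ] [DecidableLT κ] (f : α → β) (key : β → κ) :
    ∀ (xs : List α) (acc : Option α),
      xs.foldl (fun m x => mstep key m (f x)) (acc.map f) =
        (xs.foldl (mstep (fun x => key (f x))) acc).map f := by
  intro xs
  induction xs with
  | nil => intro acc; rfl
  | cons x t ih =>
    intro acc
    simp only [List.foldl_cons]
    rw [← ih]
    congr 1
    cases acc with
    | none => rfl
    | some a =>
      simp only [Option.map_some, mstep]
      by_cases h : key (f x) < key (f a) <;> simp [h]

/-- min? of a mapped list. -/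
theorem min?_map {α β κ : Type} [LT κ] [DecidableLT κ] (f : α → β) (xs : List α) (key : β → κ) :
    PySem.List.min? (xs.map f) key = (PySem.List.min? xs (fun x => key (f x))).map f := by
  rw [min?_eq_foldl_mstep, min?_eq_foldl_mstep, List.foldl_map]
  exact foldl_mstep_map f key xs none

theorem foldl_mstep_first {α κ : Type} [LinearOrder κ] (key : α → κ) :
    ∀ (xs : List α) (a m : α), xs.foldl (mstep key) (some a) = some m →
      m = a ∨ ∃ pre suf, xs = pre ++ m :: suf ∧ key m < key a ∧ ∀ y ∈ pre, key m < key y := by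
  intro xs
  induction xs with
  | nil =>
    intro a m h
    simp only [List.foldl_nil, Option.some.injEq] at h
    exact Or.inl h.symm
  | cons x t ih =>
    intro a m h
    simp only [List.foldl_cons, mstep] at h
    by_cases hc : key x < key a
    · rw [if_pos hc] at h
      rcases ih x m h with h1 | ⟨pre, suf, heq, hlt, hpre⟩
      · subst h1
        exact Or.inr ⟨[], t, rfl, hc, by simp⟩
      · exact Or.inr ⟨x :: pre, suf, by rw [heq, List.cons_append], lt_trans hlt hc,
          fun y hy => by rcases List.mem_cons.mp hy with h2 | h2
                         · subst h2; exact hlt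
                         · exact hpre y h2⟩
    · rw [if_neg hc] at h
      rcases ih a m h with h1 | ⟨pre, suf, heq, hlt, hpre⟩
      · exact Or.inl h1
      · exact Or.inr ⟨x :: pre, suf, by rw [heq, List.cons_append], hlt,
          fun y hy => by rcases List.mem_cons.mp hy with h2 | h2
                         · subst h2; exact lt_of_lt_of_le hlt (le_of_not_gt hc)
                         · exact hpre y h2⟩

/-- min? returns the FIRST key-minimal element: everything before it has strictly larger key. -/
theorem min?_first {α κ : Type} [LinearOrder κ] (xs : List α) (key : α → κ) (m : α)
    (h : PySem.List.min? xs key = some m) :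
    ∃ pre suf, xs = pre ++ m :: suf ∧ ∀ y ∈ pre, key m < key y := by
  rw [min?_eq_foldl_mstep] at h
  cases xs with
  | nil => simp at h
  | cons x t =>
    simp only [List.foldl_cons, mstep] at h
    rcases foldl_mstep_first key t x m h with h1 | ⟨pre, suf, heq, hlt, hpre⟩
    · exact ⟨[], t, by rw [h1]; rfl, by simp⟩
    · exact ⟨x :: pre, suf, by rw [heq, List.cons_append],
        fun y hy => by rcases List.mem_cons.mp hy with h2 | h2
                       · subst h2; exact hlt
                       · exact hpre y h2⟩

/-- On a `≤`-sorted list, the first abs-diff-minimal element is the lex-min. -/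
theorem min?_sorted_isLexMin (L : List Int) (one m : Int)
    (hpw : L.Pairwise (· ≤ ·))
    (hm : PySem.List.min? L (fun x => |x - one|) = some m) :
    IsLexMin one m L := by
  refine ⟨PySem.List.min?_mem hm, fun y hy => ?_⟩
  have hle : |m - one| ≤ |y - one| := PySem.List.min?_isMin hm y hy
  rcases lt_or_eq_of_le hle with h1 | h1
  · exact Or.inl h1
  · refine Or.inr ⟨h1, ?_⟩
    obtain ⟨pre, suf, heq, hpre⟩ := min?_first L (fun x => |x - one|) m hm
    subst heq
    rcases List.mem_append.mp hy with h2 | h2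
    · exact absurd h1.symm (ne_of_gt (hpre y h2))
    · rcases List.mem_cons.mp h2 with h3 | h3
      · exact le_of_eq h3.symm
      · exact List.rel_of_pairwise_cons ((List.pairwise_append.mp hpw).2.1) h3

theorem a_isLexMin (values : List Int) (one : Int) (h : values ≠ []) :
    IsLexMin one (nearest_value values one) values := by
  unfold nearest_value
  by_cases hone : values.contains one
  · rw [if_pos hone]
    refine ⟨List.contains_iff_mem.mp hone, fun y hy => ?_⟩
    rw [sub_self, abs_zero]
    by_cases h0 : |y - one| = 0
    · exact Or.inr ⟨h0.symm, by have := abs_eq_zero.mp h0; omega⟩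
    · exact Or.inl (lt_of_le_of_ne (abs_nonneg _) (Ne.symm h0))
  · rw [if_neg hone]
    set L := PySem.List.sorted values (fun x => x) false with hL
    have hmemL : ∀ z : Int, z ∈ L ↔ z ∈ values := fun z => PySem.List.mem_sorted values (fun x => x) false z
    have hLne : L ≠ [] := fun hnil => h ((PySem.List.sorted_eq_nil_iff _ _ _).mp hnil)
    -- min? L is some m
    obtain ⟨m, hm⟩ := Option.isSome_iff_exists.mp (by
      rw [Option.isSome_iff_ne_none]
      intro hnone
      exact hLne ((PySem.List.min?_eq_none_iff _ _).mp hnone) :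
        (PySem.List.min? L (fun x => |x - one|)).isSome)
    have hpw : L.Pairwise (· ≤ ·) := PySem.List.sorted_pairwise values (fun x => x)
    have hlex : IsLexMin one m L := min?_sorted_isLexMin L one m hpw hm
    -- the head of the sorted index list is f m
    have hhead : (PySem.List.sorted
        (L.map (fun item => ((((PySem.List.index? L item).getD 0 : Nat) : Int), |item - one|)))
        (fun x => x.2) false).head? =
        some ((((PySem.List.index? L m).getD 0 : Nat) : Int), |m - one|) := by
      rw [headOpt_sorted_eq_min?,
        min?_map (fun item => ((((PySem.List.index? L item).getD 0 : Nat) : Int), |item - one|)) L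
          (fun x => x.2)]
      have : (fun x : Int =>
          (((((PySem.List.index? L x).getD 0 : Nat) : Int), |x - one|) : Int × Int).2) =
          (fun x : Int => |x - one|) := rfl
      rw [this, hm]
      rfl
    -- the returned element is m
    obtain ⟨k, hk⟩ := Option.isSome_iff_exists.mp ((PySem.List.index?_isSome_iff _ _).mpr (hlex.1))
    obtain ⟨hklen, hkval, _⟩ := PySem.List.getElem_of_index?_eq_some hk
    have hres : PySem.List.pyGetD L
        (((PySem.List.sorted
          (L.map (fun item => ((((PySem.List.index? L item).getD 0 : Nat) : Int), |item - one|)))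
          (fun x => x.2) false).headD (0, 0)).1) 0 = m := by
      rw [List.headD_eq_head?_getD, hhead, Option.getD_some, hk, Option.getD_some,
        PySem.List.pyGetD_natCast, List.getD_eq_getElem _ _ hklen, hkval]
    rw [hres]
    exact isLexMin_of_perm hmemL hlex

-- ===== VERDICT (by name: the statement is the Claim_ definition above) =====
theorem nearest_value_spec : Claim_equal_nearest_value := by
  intro values one _ hpre
  unfold Spec_nearest_value
  exact isLexMin_unique (a_isLexMin values one hpre) (alt_isLexMin values one hpre)
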